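-- pv_equiv track=rewrite | github.com/namishh/aoc2k23 | 14-parabolic-reflector-dish/1.py | moveballs
-- ===== SOURCE A (Python) =====
-- def moveballs(lst):
--     balls = [i for i, char in enumerate(lst) if char == 'O']
--     for ball in sorted(balls, reverse=True):
--         index = ball
--         while index < len(lst) - 1 and lst[index + 1] == '.':
--             lst[index], lst[index + 1] = lst[index + 1], lst[index]
--             index += 1
--
--     return lst
-- ===== SOURCE B (Python) =====
-- # B: single left-to-right pass over segments delimited by walls (anything that is
-- # neither '.' nor 'O'); within each segment all balls end up packed at the right.
-- # Note: A mutates lst in place and returns it; B builds a new list (return values agree).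
-- def moveballs(lst):
--     out = []
--     dots = 0
--     balls = 0
--     for ch in lst:
--         if ch == '.':
--             dots += 1
--         elif ch == 'O':
--             balls += 1
--         else:
--             out.extend(['.'] * dots)
--             out.extend(['O'] * balls)
--             out.append(ch)
--             dots = 0
--             balls = 0
--     out.extend(['.'] * dots)
--     out.extend(['O'] * balls)
--     return out
-- ===== Notes on version B (the rewrite author's own statement) =====
-- stated objective: alternative
-- what changed: Replaced the per-ball bubble loop (collect ball indices, sort descending, roll each ball rightward one swap at a time) by a single left-to-right counting pass that emits, for each wall-delimited segment, its dots followed by its balls.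
import Mathlib
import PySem

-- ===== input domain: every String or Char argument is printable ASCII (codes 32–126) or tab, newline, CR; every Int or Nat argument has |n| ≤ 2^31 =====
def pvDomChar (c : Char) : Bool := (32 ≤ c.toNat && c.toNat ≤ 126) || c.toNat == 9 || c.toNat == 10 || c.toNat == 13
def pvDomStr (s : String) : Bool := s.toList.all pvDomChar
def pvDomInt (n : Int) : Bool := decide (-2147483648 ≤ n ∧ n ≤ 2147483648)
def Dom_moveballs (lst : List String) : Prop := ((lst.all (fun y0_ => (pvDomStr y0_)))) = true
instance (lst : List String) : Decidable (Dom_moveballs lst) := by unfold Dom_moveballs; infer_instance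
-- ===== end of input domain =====

-- B replaces A's per-ball bubble loop by one counting pass over wall-delimited segments.
-- A mutates lst in place and returns it; B builds a fresh list — the equivalence proved is about the return value.

-- ===== PORT A =====
-- the inner 'while' loop of A: roll the ball at `index` rightward one swap at a time
def rollLoop (l : List String) (index : Int) : List String :=
  if h : index < (l.length : Int) - 1 ∧ PySem.List.pyGetD l (index + 1) "" = "." then
    -- lst[index], lst[index+1] = lst[index+1], lst[index]: both RHS values are read from the old l
    rollLoop
      (PySem.List.pySetD
        (PySem.List.pySetD l index (PySem.List.pyGetD l (index + 1) ""))
        (index + 1) (PySem.List.pyGetD l index ""))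
      (index + 1)
  else l
termination_by ((l.length : Int) - index).toNat
decreasing_by
  simp only [PySem.List.length_pySetD]
  omega

def moveballs (lst : List String) : List String :=
  let balls : List Int := ((PySem.List.enumerate lst).filter (fun p => p.2 == "O")).map (·.1)
  (PySem.List.sorted balls (fun x => x) true).foldl (fun l ball => rollLoop l ball) lst

-- ===== PORT B =====
def moveballs_alt (lst : List String) : List String :=
  let s := lst.foldl
    (fun (st : List String × Nat × Nat) ch =>
      if ch == "." then (st.1, st.2.1 + 1, st.2.2)
      else if ch == "O" then (st.1, st.2.1, st.2.2 + 1)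
      else (st.1 ++ List.replicate st.2.1 "." ++ List.replicate st.2.2 "O" ++ [ch], 0, 0))
    ([], 0, 0)
  s.1 ++ List.replicate s.2.1 "." ++ List.replicate s.2.2 "O"

-- ===== PRECONDITION & SPEC =====
def Spec_moveballs (lst : List String) (out : List String) : Prop := out = moveballs_alt lst
instance (lst : List String) (out : List String) : Decidable (Spec_moveballs lst out) := by unfold Spec_moveballs; infer_instance

-- ===== CLAIM (what is proved, stated in full; the proofs are below) =====
def Claim_equal_moveballs : Prop := ∀ (lst : List String), Dom_moveballs lst → Spec_moveballs lst (moveballs lst)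

-- ===== LEMMAS AND PROOFS =====

-- canonical recursive form of B: accumulate dot/ball counts, flush at each wall
def go : List String → Nat → Nat → List String
  | [], d, b => List.replicate d "." ++ List.replicate b "O"
  | c :: r, d, b =>
    if c = "." then go r (d + 1) b
    else if c = "O" then go r d (b + 1)
    else List.replicate d "." ++ List.replicate b "O" ++ c :: go r 0 0

-- counts of dots / balls in the first segment, and the remainder from the first wall on
def segD : List String → Nat
  | [] => 0
  | c :: r => if c = "." then segD r + 1 else if c = "O" then segD r else 0

def segB : List String → Nat
  | [] => 0
  | c :: r => if c = "." then segB r else if c = "O" then segB r + 1 else 0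

def segT : List String → List String
  | [] => []
  | c :: r => if c = "." then segT r else if c = "O" then segT r else c :: go r 0 0

lemma fold_go (l : List String) : ∀ (out : List String) (d b : Nat),
    (let s := l.foldl
      (fun (st : List String × Nat × Nat) ch =>
        if ch == "." then (st.1, st.2.1 + 1, st.2.2)
        else if ch == "O" then (st.1, st.2.1, st.2.2 + 1)
        else (st.1 ++ List.replicate st.2.1 "." ++ List.replicate st.2.2 "O" ++ [ch], 0, 0))
      (out, d, b)
     s.1 ++ List.replicate s.2.1 "." ++ List.replicate s.2.2 "O") = out ++ go l d b := by
  induction l with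
  | nil => intro out d b; simp [go]
  | cons c r ih =>
    intro out d b
    by_cases hd : c = "."
    · simpa [hd, go] using ih out (d + 1) b
    · by_cases ho : c = "O"
      · simpa [hd, ho, go] using ih out d (b + 1)
      · simpa [hd, ho, go] using
          ih (out ++ List.replicate d "." ++ List.replicate b "O" ++ [c]) 0 0

lemma alt_eq_go (l : List String) : moveballs_alt l = go l 0 0 := by
  show _ = _
  rw [moveballs_alt]
  simpa using fold_go l [] 0 0

lemma go_shape (l : List String) : ∀ d b,
    go l d b = List.replicate (d + segD l) "." ++ List.replicate (b + segB l) "O" ++ segT l := by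
  induction l with
  | nil => intro d b; simp [go, segD, segB, segT]
  | cons c r ih =>
    intro d b
    by_cases hd : c = "."
    · simp [go, segD, segB, segT, hd, ih, Nat.add_comm, Nat.add_assoc, Nat.add_left_comm]
    · by_cases ho : c = "O"
      · simp [go, segD, segB, segT, hd, ho, ih, Nat.add_comm, Nat.add_assoc, Nat.add_left_comm]
      · simp [go, segD, segB, segT, hd, ho]

lemma segT_shape (l : List String) : segT l = [] ∨ ∃ w r, segT l = w :: r ∧ w ≠ "." := by
  induction l with
  | nil => exact Or.inl rfl
  | cons c r ih =>
    by_cases hd : c = "."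
    · simpa [segT, hd] using ih
    · by_cases ho : c = "O"
      · simpa [segT, hd, ho] using ih
      · exact Or.inr ⟨c, go r 0 0, by simp [segT, hd, ho], hd⟩

-- rolling is oblivious to a fixed head cell
lemma rollLoop_cons_aux (c : String) : ∀ (m n : Nat) (suf : List String), suf.length ≤ n + m →
    rollLoop (c :: suf) ((n : Int) + 1) = c :: rollLoop suf (n : Int) := by
  intro m
  induction m with
  | zero =>
    intro n suf hb
    rw [rollLoop]
    conv_rhs => rw [rollLoop]
    rw [dif_neg (by push_cast [List.length_cons]; omega),
      dif_neg (by push_cast; omega)]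
  | succ m ih =>
    intro n suf hb
    have e1 : (n : Int) + 1 = ((n + 1 : Nat) : Int) := by push_cast; ring
    have e2 : (n : Int) + 1 + 1 = ((n + 2 : Nat) : Int) := by push_cast; ring
    by_cases hc : (n : Int) < (suf.length : Int) - 1 ∧ PySem.List.pyGetD suf ((n : Int) + 1) "" = "."
    · have g1 : PySem.List.pyGetD (c :: suf) ((n : Int) + 1) "" = suf.getD n "" := by
        rw [e1, PySem.List.pyGetD_natCast, List.getD_cons_succ]
      have g2 : PySem.List.pyGetD (c :: suf) ((n : Int) + 1 + 1) "" = suf.getD (n + 1) "" := by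
        rw [e2, PySem.List.pyGetD_natCast, show n + 2 = (n + 1) + 1 from rfl, List.getD_cons_succ]
      have g3 : PySem.List.pyGetD suf ((n : Int)) "" = suf.getD n "" :=
        PySem.List.pyGetD_natCast ..
      have g4 : PySem.List.pyGetD suf ((n : Int) + 1) "" = suf.getD (n + 1) "" := by
        rw [e1, PySem.List.pyGetD_natCast]
      have s1 : ∀ v, PySem.List.pySetD (c :: suf) ((n : Int) + 1) v = c :: suf.set n v := by
        intro v; rw [e1, PySem.List.pySetD_natCast, List.set_cons_succ]
      have s2 : ∀ (x : List String) v, PySem.List.pySetD (c :: x) ((n : Int) + 1 + 1) v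
          = c :: x.set (n + 1) v := by
        intro x v
        rw [e2, PySem.List.pySetD_natCast, show n + 2 = (n + 1) + 1 from rfl, List.set_cons_succ]
      have s3 : ∀ v, PySem.List.pySetD suf ((n : Int)) v = suf.set n v := by
        intro v; rw [PySem.List.pySetD_natCast]
      have s4 : ∀ (x : List String) v, PySem.List.pySetD x ((n : Int) + 1) v = x.set (n + 1) v := by
        intro x v; rw [e1, PySem.List.pySetD_natCast]
      have hc' : ((n : Int) + 1) < ((c :: suf).length : Int) - 1 ∧
          PySem.List.pyGetD (c :: suf) ((n : Int) + 1 + 1) "" = "." := by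
        refine ⟨by push_cast [List.length_cons]; omega, ?_⟩
        rw [g2]; rw [g4] at hc; exact hc.2
      rw [rollLoop]
      conv_rhs => rw [rollLoop]
      rw [dif_pos hc', dif_pos hc, g1, g2, g3, g4, s1, s2, s3, s4]
      have := ih (n + 1) ((suf.set n (suf.getD (n + 1) "")).set (n + 1) (suf.getD n ""))
        (by simp; omega)
      rw [show ((n + 1 : Nat) : Int) = (n : Int) + 1 from by push_cast; ring] at this
      exact this
    · rw [rollLoop]
      conv_rhs => rw [rollLoop]
      rw [dif_neg hc, dif_neg]
      intro h
      apply hc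
      refine ⟨by push_cast [List.length_cons] at h ⊢; omega, ?_⟩
      have h2 := h.2
      rw [e2, PySem.List.pyGetD_natCast, show n + 2 = (n + 1) + 1 from rfl,
        List.getD_cons_succ] at h2
      rw [e1, PySem.List.pyGetD_natCast]
      exact h2

lemma rollLoop_cons (c : String) (n : Nat) (suf : List String) :
    rollLoop (c :: suf) ((n : Int) + 1) = c :: rollLoop suf (n : Int) :=
  rollLoop_cons_aux c suf.length n suf (by omega)

-- rolling one ball through D dots: it stops at the first non-dot
lemma rollLoop_ball : ∀ (D : Nat) (B : Nat) (t : List String),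
    (t = [] ∨ ∃ w r, t = w :: r ∧ w ≠ ".") →
    rollLoop ("O" :: (List.replicate D "." ++ List.replicate B "O" ++ t)) 0
      = List.replicate D "." ++ List.replicate (B + 1) "O" ++ t := by
  intro D
  induction D with
  | zero =>
    intro B t ht
    rw [rollLoop, dif_neg]
    · simp [List.replicate_succ]
    · intro h
      rcases h with ⟨h1, h2⟩
      rw [show (0 : Int) + 1 = ((1 : Nat) : Int) from by norm_num,
        PySem.List.pyGetD_natCast] at h2
      cases B with
      | zero =>
        rcases ht with rfl | ⟨w, r, rfl, hw⟩
        · simp at h1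
        · simp at h2; exact hw h2
      | succ B => simp [List.replicate_succ] at h2
  | succ D ih =>
    intro B t ht
    rw [rollLoop, dif_pos]
    · have hget0 : PySem.List.pyGetD
          ("O" :: (List.replicate (D + 1) "." ++ List.replicate B "O" ++ t)) 0 "" = "O" := by
        rw [show (0 : Int) = ((0 : Nat) : Int) from by norm_num, PySem.List.pyGetD_natCast]
        rfl
      have hget1 : PySem.List.pyGetD
          ("O" :: (List.replicate (D + 1) "." ++ List.replicate B "O" ++ t)) (0 + 1) "" = "." := by
        rw [show (0 : Int) + 1 = ((1 : Nat) : Int) from by norm_num, PySem.List.pyGetD_natCast]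
        simp [List.replicate_succ]
      rw [hget0, hget1]
      have hset : PySem.List.pySetD
          (PySem.List.pySetD ("O" :: (List.replicate (D + 1) "." ++ List.replicate B "O" ++ t)) 0 ".")
          (0 + 1) "O"
          = "." :: "O" :: (List.replicate D "." ++ List.replicate B "O" ++ t) := by
        rw [show (0 : Int) = ((0 : Nat) : Int) from by norm_num,
          show ((0 : Nat) : Int) + 1 = ((1 : Nat) : Int) from by norm_num,
          PySem.List.pySetD_natCast, PySem.List.pySetD_natCast]
        simp [List.replicate_succ]
      rw [hset, show (0 : Int) + 1 = ((0 : Nat) : Int) + 1 from by norm_num, rollLoop_cons,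
        show ((0 : Nat) : Int) = (0 : Int) from by norm_num, ih B t ht]
      simp [List.replicate_succ]
    · constructor
      · simp only [List.length_cons, List.length_append, List.length_replicate]
        push_cast
        omega
      · rw [show (0 : Int) + 1 = ((1 : Nat) : Int) from by norm_num, PySem.List.pyGetD_natCast]
        simp [List.replicate_succ]

-- balls of the enumerate-filter, with general start
def bsAux (l : List String) (s : Int) : List Int :=
  ((PySem.List.enumerate l s).filter (fun p => p.2 == "O")).map (·.1)

lemma bsAux_cons (c : String) (r : List String) (s : Int) :
    bsAux (c :: r) s = (if c = "O" then [s] else []) ++ bsAux r (s + 1) := by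
  by_cases h : c = "O" <;>
    simp [bsAux, PySem.List.enumerate_cons, h]

lemma bsAux_shift (l : List String) : ∀ s : Int, bsAux l (s + 1) = (bsAux l s).map (· + 1) := by
  induction l with
  | nil => intro s; simp [bsAux, PySem.List.enumerate_nil]
  | cons c r ih =>
    intro s
    rw [bsAux_cons, bsAux_cons, ih]
    by_cases h : c = "O" <;> simp [h]

lemma bsAux_nonneg (l : List String) : ∀ s : Int, ∀ i ∈ bsAux l s, s ≤ i := by
  induction l with
  | nil => intro s i hi; simp [bsAux, PySem.List.enumerate_nil] at hi
  | cons c r ih =>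
    intro s i hi
    rw [bsAux_cons] at hi
    rcases List.mem_append.1 hi with h | h
    · by_cases hc : c = "O" <;> simp [hc] at h; omega
    · have := ih (s + 1) i h; omega

lemma bsAux_pairwise (l : List String) : ∀ s : Int, (bsAux l s).Pairwise (· < ·) := by
  induction l with
  | nil => intro s; simp [bsAux, PySem.List.enumerate_nil]
  | cons c r ih =>
    intro s
    rw [bsAux_cons]
    by_cases hc : c = "O"
    · simp only [hc, if_pos rfl]
      refine List.Pairwise.cons ?_ (ih (s + 1))
      intro i hi
      have := bsAux_nonneg r (s + 1) i hi; omega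
    · simpa [hc] using ih (s + 1)

lemma foldl_shift (c : String) : ∀ (ks : List Int) (l : List String),
    (∀ i ∈ ks, 0 ≤ i) →
    (ks.map (· + 1)).foldl (fun l ball => rollLoop l ball) (c :: l)
      = c :: ks.foldl (fun l ball => rollLoop l ball) l := by
  intro ks
  induction ks with
  | nil => intro l _; rfl
  | cons k ks ih =>
    intro l hnn
    have hk : 0 ≤ k := hnn k (by simp)
    have hkc : rollLoop (c :: l) (k + 1) = c :: rollLoop l k := by
      have := rollLoop_cons c k.toNat l
      rwa [Int.toNat_of_nonneg hk] at this
    simp only [List.map_cons, List.foldl_cons, hkc]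
    exact ih (rollLoop l k) (fun i hi => hnn i (by simp [hi]))

-- the heart of the proof: A's descending-ball fold computes the segment normal form
lemma fold_balls_eq_go (l : List String) :
    ((bsAux l 0).reverse).foldl (fun l ball => rollLoop l ball) l = go l 0 0 := by
  induction l with
  | nil => rfl
  | cons c r ih =>
    have hnn : ∀ i ∈ (bsAux r 0).reverse, (0 : Int) ≤ i := by
      intro i hi
      have := bsAux_nonneg r 0 i (List.mem_reverse.1 hi); omega
    have hshift : bsAux r (0 + 1) = (bsAux r 0).map (· + 1) := by
      simpa using bsAux_shift r 0
    rw [bsAux_cons, hshift]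
    by_cases ho : c = "O"
    · subst ho
      rw [if_pos rfl, List.reverse_append, ← List.map_reverse,
        List.reverse_singleton, List.foldl_append,
        foldl_shift "O" ((bsAux r 0).reverse) r hnn, ih]
      simp only [List.foldl_cons, List.foldl_nil]
      rw [go_shape r 0 0, show (0 : Nat) + segD r = segD r from by omega,
        show (0 : Nat) + segB r = segB r from by omega,
        rollLoop_ball (segD r) (segB r) (segT r) (segT_shape r),
        show go ("O" :: r) 0 0 = go r 0 1 from by simp [go], go_shape r 0 1]
      simp [Nat.add_comm]
    · rw [if_neg ho, List.nil_append,
        ← List.map_reverse, foldl_shift c ((bsAux r 0).reverse) r hnn, ih]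
      by_cases hd : c = "."
      · subst hd
        rw [show go ("." :: r) 0 0 = go r 1 0 from by simp [go],
          go_shape r 1 0, go_shape r 0 0]
        simp [Nat.add_comm, List.replicate_succ]
      · simp [go, hd, ho]

lemma sorted_balls (l : List String) :
    PySem.List.sorted (bsAux l 0) (fun x => x) true = (bsAux l 0).reverse := by
  apply PySem.List.sorted_rev_eq_of_perm_of_pairwise_gt
  · exact List.reverse_perm _
  · rw [List.pairwise_reverse]
    exact bsAux_pairwise l 0

-- ===== VERDICT (by name: the statement is the Claim_ definition above) =====
theorem moveballs_spec : Claim_equal_moveballs := by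
  intro lst _
  unfold Spec_moveballs
  rw [alt_eq_go,
    show moveballs lst
        = (PySem.List.sorted (bsAux lst 0) (fun x => x) true).foldl
            (fun l ball => rollLoop l ball) lst from rfl,
    sorted_balls, fold_balls_eq_go]
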